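-- pv_equiv track=rewrite | github.com/NovikovaAnna/PY100 | game_final.py | win_combinations
-- ===== SOURCE A (Python) =====
-- def win_combinations(game_table):
--     diag1 = []
--     diag2 = []
--     rows = []
--     cols = []
--     for i in range(game_table):
--         tmp_row = []
--         tmp_col = []
--         for h in range(game_table):
--             tmp_row.append((i,h))
--             tmp_col.append((h,i))
--         rows.append(tmp_row)
--         cols.append(tmp_col)
--         diag1.append((i,i))
--         diag2.append((i,game_table - 1 - i))
--
--     return rows + cols + [diag1] + [diag2]
-- ===== SOURCE B (Python) =====
-- def win_combinations(game_table):
--     # Every winning line is a ray: a start cell plus n steps of a direction vector.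
--     n = game_table
--     specs = [((i, 0), (0, 1)) for i in range(n)] \
--           + [((0, i), (1, 0)) for i in range(n)] \
--           + [((0, 0), (1, 1)), ((0, n - 1), (1, -1))]
--     return [[(sx + k * dx, sy + k * dy) for k in range(n)]
--             for (sx, sy), (dx, dy) in specs]
-- ===== Notes on version B (the rewrite author's own statement) =====
-- stated objective: alternative
-- what changed: B represents every winning line as a (start, direction) ray spec and expands all specs with one uniform generator sx+k*dx, sy+k*dy, instead of A's double loop accumulating rows, cols and the two diagonals in four parallel accumulators.
import Mathlib
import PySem

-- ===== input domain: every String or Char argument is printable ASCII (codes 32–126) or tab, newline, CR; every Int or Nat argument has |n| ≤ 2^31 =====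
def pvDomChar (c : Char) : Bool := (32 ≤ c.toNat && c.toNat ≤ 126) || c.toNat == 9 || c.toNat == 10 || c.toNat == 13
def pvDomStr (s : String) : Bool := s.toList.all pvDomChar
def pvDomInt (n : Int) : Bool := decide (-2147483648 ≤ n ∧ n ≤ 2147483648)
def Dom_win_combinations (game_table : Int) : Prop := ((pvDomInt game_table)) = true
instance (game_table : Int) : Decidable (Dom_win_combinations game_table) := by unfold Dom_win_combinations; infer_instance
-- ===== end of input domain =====

-- B describes every winning line as a (start, direction) ray and expands all specs with
-- one uniform generator, instead of A's double loop with four parallel accumulators;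
-- objective: alternative. Return values are proved equal everywhere.

-- ===== PORT A =====
-- literal port of A: one loop over range(game_table) with an inner loop building
-- tmp_row/tmp_col, accumulating (rows, cols, diag1, diag2)
def win_combinations (game_table : Int) : List (List (Int × Int)) :=
  let st := (PySem.List.pyRange 0 game_table 1).foldl
    (fun (s : List (List (Int × Int)) × List (List (Int × Int)) ×
              List (Int × Int) × List (Int × Int)) i =>
      let tmp := (PySem.List.pyRange 0 game_table 1).foldl
        (fun (t : List (Int × Int) × List (Int × Int)) h =>
          (t.1 ++ [(i, h)], t.2 ++ [(h, i)]))
        ([], [])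
      (s.1 ++ [tmp.1], s.2.1 ++ [tmp.2],
       s.2.2.1 ++ [(i, i)], s.2.2.2 ++ [(i, game_table - 1 - i)]))
    ([], [], [], [])
  st.1 ++ st.2.1 ++ [st.2.2.1] ++ [st.2.2.2]

-- ===== PORT B =====
-- port of B (Source B): the list of ray specs ((sx,sy),(dx,dy)), then one uniform expansion
def win_combinations_alt (game_table : Int) : List (List (Int × Int)) :=
  let specs : List ((Int × Int) × (Int × Int)) :=
    (PySem.List.pyRange 0 game_table 1).map (fun i => ((i, 0), (0, 1)))
    ++ (PySem.List.pyRange 0 game_table 1).map (fun i => ((0, i), (1, 0)))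
    ++ [((0, 0), (1, 1)), ((0, game_table - 1), (1, -1))]
  specs.map (fun s =>
    (PySem.List.pyRange 0 game_table 1).map
      (fun k => (s.1.1 + k * s.2.1, s.1.2 + k * s.2.2)))

-- ===== PRECONDITION & SPEC =====
def Spec_win_combinations (game_table : Int) (out : List (List (Int × Int))) : Prop := out = win_combinations_alt game_table
instance (game_table : Int) (out : List (List (Int × Int))) : Decidable (Spec_win_combinations game_table out) := by unfold Spec_win_combinations; infer_instance

-- ===== CLAIM (what is proved, stated in full; the proofs are below) =====
def Claim_equal_win_combinations : Prop := ∀ (game_table : Int), Dom_win_combinations game_table → Spec_win_combinations game_table (win_combinations game_table)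

-- ===== LEMMAS AND PROOFS =====

-- A's inner loop: tmp_row/tmp_col accumulate the two comprehensions
lemma pvInnerLoop (rng : List Int) (i : Int) :
    ∀ (a b : List (Int × Int)),
      rng.foldl (fun (t : List (Int × Int) × List (Int × Int)) h =>
          (t.1 ++ [(i, h)], t.2 ++ [(h, i)])) (a, b)
        = (a ++ rng.map (fun h => (i, h)), b ++ rng.map (fun h => (h, i))) := by
  induction rng with
  | nil => simp
  | cons x xs ih => intro a b; simp [ih]

-- A's outer loop: the four accumulators each collect a map over the range
lemma pvQuadLoop {α : Type} (l : List α) (g1 g2 : α → List (Int × Int))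
    (g3 g4 : α → (Int × Int)) :
    ∀ (a b : List (List (Int × Int))) (c d : List (Int × Int)),
      l.foldl (fun s i =>
          (s.1 ++ [g1 i], s.2.1 ++ [g2 i], s.2.2.1 ++ [g3 i], s.2.2.2 ++ [g4 i]))
        (a, b, c, d)
        = (a ++ l.map g1, b ++ l.map g2, c ++ l.map g3, d ++ l.map g4) := by
  induction l with
  | nil => simp
  | cons x xs ih => intro a b c d; simp [ih]

theorem win_combinations_spec : Claim_equal_win_combinations := by
  intro n _
  unfold Spec_win_combinations win_combinations win_combinations_alt
  rw [pvQuadLoop]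
  simp only [pvInnerLoop, List.nil_append, List.map_append, List.map_map, List.map_cons,
    List.map_nil, Function.comp_def]
  simp only [List.append_assoc, List.cons_append, List.nil_append]
  congr 1
  · exact List.map_congr_left fun i _ => List.map_congr_left fun k _ => by
      simp
  congr 1
  · exact List.map_congr_left fun i _ => List.map_congr_left fun k _ => by
      simp
  congr 1
  · exact List.map_congr_left fun k _ => by simp
  · refine congrArg (fun x => [x]) (List.map_congr_left fun k _ => ?_)
    simp; ring
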